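-- pv_equiv track=rewrite | github.com/zhao-bob/mrppg | leetcode/leet1124.py | longestWPI1
-- ===== SOURCE A (Python) =====
-- from typing import List
--
-- def longestWPI1(hours: List[int]) -> int:
--     n = len(hours)
--     s = [0] * (n + 1)  # 前缀和
--     st = [0]  # s[0]
--     for j, h in enumerate(hours, 1):
--         s[j] = s[j - 1] + (1 if h > 8 else -1)
--         if s[j] < s[st[-1]]:
--             st.append(j)  # 感兴趣的 j
--     ans = 0
--     for i in range(n, 0, -1):
--         while st and s[i] > s[st[-1]]:
--             ans = max(ans, i - st.pop())  # [st[-1],i) 可能是最长子数组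
--     return ans
-- ===== SOURCE B (Python) =====
-- from typing import List
--
-- def longestWPI1(hours: List[int]) -> int:
--     ans = 0
--     score = 0
--     seen = {}  # first index at which each running score value occurred
--     for i, h in enumerate(hours):
--         score += 1 if h > 8 else -1
--         if score > 0:
--             ans = i + 1
--         elif score - 1 in seen:
--             ans = max(ans, i - seen[score - 1])
--         if score not in seen:
--             seen[score] = i
--     return ans
-- ===== Notes on version B (the rewrite author's own statement) =====
-- stated objective: idiomatic
-- what changed: Replaced A's prefix-sum array + monotonic stack of prefix minima + backward two-pointer popping with a single forward pass that keeps a dict mapping each running score to the first index where it occurred.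
import Mathlib
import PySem

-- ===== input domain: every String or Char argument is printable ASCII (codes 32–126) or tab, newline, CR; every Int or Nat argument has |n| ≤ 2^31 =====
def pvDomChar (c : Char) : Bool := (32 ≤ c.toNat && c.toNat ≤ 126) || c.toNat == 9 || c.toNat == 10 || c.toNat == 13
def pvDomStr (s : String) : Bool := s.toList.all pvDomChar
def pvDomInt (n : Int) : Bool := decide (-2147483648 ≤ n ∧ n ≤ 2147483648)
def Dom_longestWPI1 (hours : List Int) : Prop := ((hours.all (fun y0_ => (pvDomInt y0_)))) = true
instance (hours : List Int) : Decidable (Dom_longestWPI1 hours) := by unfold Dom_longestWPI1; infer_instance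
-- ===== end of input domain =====

-- B replaces A's prefix-sum array + monotonic stack + backward popping by one forward pass
-- with a dict of first occurrences of each running score (idiomatic one-pass solution).

-- ===== PORT A =====
-- Python list `st` is kept reversed: head = Python's st[-1] (the top); append = cons, pop = tail.
-- first loop: `for j, h in enumerate(hours, 1): s[j] = s[j-1] + (1 if h > 8 else -1); if s[j] < s[st[-1]]: st.append(j)`
def pvBuild (s : List Int) (st : List Nat) (j : Nat) : List Int → List Int × List Nat
  | [] => (s, st)
  | h :: t =>
    let s' := s.set j (s.getD (j-1) 0 + (if h > 8 then (1:Int) else -1))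
    if s'.getD j 0 < s'.getD (st.headD 0) 0 then pvBuild s' (j :: st) (j+1) t
    else pvBuild s' st (j+1) t

-- `while st and s[i] > s[st[-1]]: ans = max(ans, i - st.pop())`
def pvPop (s : List Int) (i : Nat) : List Nat → Int → Int × List Nat
  | [], ans => (ans, [])
  | p :: rest, ans =>
    if s.getD i 0 > s.getD p 0 then pvPop s i rest (max ans ((i:Int) - (p:Int)))
    else (ans, p :: rest)

-- `for i in range(n, 0, -1): ...`
def pvOuter (s : List Int) : Nat → List Nat → Int → Int
  | 0, _, ans => ans
  | i+1, st, ans =>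
    let r := pvPop s (i+1) st ans
    pvOuter s i r.2 r.1

def longestWPI1 (hours : List Int) : Int :=
  let n := hours.length
  let bs := pvBuild (List.replicate (n+1) 0) [0] 1 hours
  pvOuter bs.1 n bs.2 0

-- ===== PORT B =====
-- loop body of Source B: state = (ans, score, seen), ih = (i, h) from enumerate(hours)
def pvStep (st : Int × Int × PySem.Dict Int Int) (ih : Int × Int) : Int × Int × PySem.Dict Int Int :=
  let score := st.2.1 + (if ih.2 > 8 then (1:Int) else -1)
  let seen := st.2.2
  let ans :=
    if score > 0 then ih.1 + 1
    else if seen.contains (score - 1) then max st.1 (ih.1 - seen.getD (score - 1) 0)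
    else st.1
  let seen' := if seen.contains score then seen else seen.insert score ih.1
  (ans, score, seen')

def longestWPI1_alt (hours : List Int) : Int :=
  ((PySem.List.enumerate hours 0).foldl pvStep (0, 0, PySem.Dict.empty)).1

-- ===== PRECONDITION & SPEC =====
def Spec_longestWPI1 (hours : List Int) (out : Int) : Prop := out = longestWPI1_alt hours
instance (hours : List Int) (out : Int) : Decidable (Spec_longestWPI1 hours out) := by unfold Spec_longestWPI1; infer_instance

-- ===== CLAIM (what is proved, stated in full; the proofs are below) =====
def Claim_equal_longestWPI1 : Prop := ∀ (hours : List Int), Dom_longestWPI1 hours → Spec_longestWPI1 hours (longestWPI1 hours)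

-- ===== LEMMAS AND PROOFS =====

def pvSc (h : Int) : Int := if h > 8 then 1 else -1

def pvPS (hours : List Int) (j : Nat) : Int := ((hours.take j).map pvSc).sum

def pvPM (hours : List Int) (p : Nat) : Prop := ∀ k, k < p → pvPS hours p < pvPS hours k

def pvG (hours : List Int) (r : Int) : Prop :=
  0 ≤ r ∧
  (∀ p j : Nat, p < j → j ≤ hours.length → pvPS hours p < pvPS hours j → (j:Int) - (p:Int) ≤ r) ∧
  (r = 0 ∨ ∃ p j : Nat, p < j ∧ j ≤ hours.length ∧ pvPS hours p < pvPS hours j ∧ r = (j:Int) - (p:Int))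

lemma pvG_unique (hours : List Int) (r r' : Int) (h : pvG hours r) (h' : pvG hours r') : r = r' := by
  obtain ⟨h0, h1, h2⟩ := h
  obtain ⟨h0', h1', h2'⟩ := h'
  apply le_antisymm
  · rcases h2 with rfl | ⟨p, j, hpj, hj, hps, rfl⟩
    · exact h0'
    · exact h1' p j hpj hj hps
  · rcases h2' with rfl | ⟨p, j, hpj, hj, hps, rfl⟩
    · exact h0
    · exact h1 p j hpj hj hps

lemma pvPS_succ (hours : List Int) (k : Nat) (hk : k < hours.length) :
    pvPS hours (k+1) = pvPS hours k + pvSc (hours.getD k 0) := by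
  unfold pvPS
  have h1 : hours.take (k+1) = hours.take k ++ [hours[k]] := by
    rw [List.take_add_one, List.getElem?_eq_getElem hk]; rfl
  rw [List.getD_eq_getElem?_getD, List.getElem?_eq_getElem hk, h1, List.map_append, List.sum_append]
  simp only [List.map_cons, List.map_nil, List.sum_cons, List.sum_nil, Option.getD_some, add_zero]

lemma pvPS_succ_bounds (hours : List Int) (k : Nat) (hk : k < hours.length) :
    pvPS hours k - 1 ≤ pvPS hours (k+1) ∧ pvPS hours (k+1) ≤ pvPS hours k + 1 := by
  rw [pvPS_succ hours k hk]
  unfold pvSc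
  split <;> omega

lemma pvIVT (hours : List Int) : ∀ (d a : Nat) (v : Int), a + d ≤ hours.length →
    v ≤ pvPS hours a → pvPS hours (a+d) ≤ v →
    ∃ c, a ≤ c ∧ c ≤ a + d ∧ pvPS hours c = v := by
  intro d
  induction d with
  | zero => intro a v _ h1 h2; exact ⟨a, le_refl a, by omega, le_antisymm (by simpa using h2) h1⟩
  | succ d ih =>
    intro a v hle h1 h2
    by_cases he : pvPS hours a = v
    · exact ⟨a, le_refl a, by omega, he⟩
    · have ha : a < hours.length := by omega
      have hb := pvPS_succ_bounds hours a ha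
      have h1' : v ≤ pvPS hours (a+1) := by omega
      have h2' : pvPS hours (a+1+d) ≤ v := by
        have : a + 1 + d = a + (d+1) := by omega
        rw [this]; exact h2
      obtain ⟨c, hc1, hc2, hc3⟩ := ih (a+1) v (by omega) h1' h2'
      exact ⟨c, by omega, by omega, hc3⟩

lemma pvExistsPM (hours : List Int) (p : Nat) :
    ∃ p', p' ≤ p ∧ pvPM hours p' ∧ pvPS hours p' ≤ pvPS hours p := by
  induction p using Nat.strong_induction_on with
  | _ p ih =>
    by_cases hp : pvPM hours p
    · exact ⟨p, le_refl p, hp, le_refl _⟩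
    · unfold pvPM at hp
      push Not at hp
      obtain ⟨k, hk, hle⟩ := hp
      obtain ⟨p', h1, h2, h3⟩ := ih k hk
      exact ⟨p', by omega, h2, by omega⟩

lemma pvFoldMax (f : Nat → Int) : ∀ (l : List Nat) (a : Int),
    a ≤ l.foldl (fun x p => max x (f p)) a ∧
    (∀ p ∈ l, f p ≤ l.foldl (fun x p => max x (f p)) a) ∧
    (l.foldl (fun x p => max x (f p)) a = a ∨ ∃ p ∈ l, l.foldl (fun x p => max x (f p)) a = f p) := by
  intro l
  induction l with
  | nil => intro a; simp
  | cons q l ih =>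
    intro a
    obtain ⟨i1, i2, i3⟩ := ih (max a (f q))
    refine ⟨le_trans (le_max_left _ _) i1, ?_, ?_⟩
    · intro p hp
      rcases List.mem_cons.mp hp with rfl | hp
      · simpa using le_trans (le_max_right a (f p)) i1
      · exact i2 p hp
    · simp only [List.foldl_cons]
      rcases i3 with h | ⟨p, hp, h⟩
      · rcases max_choice a (f q) with hm | hm
        · left; rw [h, hm]
        · right; exact ⟨q, List.mem_cons_self, by rw [h, hm]⟩
      · right; exact ⟨p, List.mem_cons_of_mem _ hp, h⟩

lemma pvPop_spec (s : List Int) (c : Nat) : ∀ (st : List Nat) (ans : Int),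
    pvPop s c st ans =
      ((st.takeWhile (fun p => decide (s.getD c 0 > s.getD p 0))).foldl
          (fun (x : Int) (p : Nat) => max x ((c:Int) - (p:Int))) ans,
       st.dropWhile (fun p => decide (s.getD c 0 > s.getD p 0))) := by
  intro st
  induction st with
  | nil => intro ans; simp [pvPop]
  | cons p rest ih =>
    intro ans
    by_cases h : s.getD c 0 > s.getD p 0
    · have hb : decide (s.getD c 0 > s.getD p 0) = true := by simpa using h
      rw [pvPop, if_pos h, ih]
      simp only [List.takeWhile_cons, List.dropWhile_cons, hb, if_true, List.foldl_cons]
    · have hb : decide (s.getD c 0 > s.getD p 0) = false := by simpa using h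
      rw [pvPop, if_neg h]
      simp only [List.takeWhile_cons, List.dropWhile_cons, hb, Bool.false_eq_true, if_false,
        List.foldl_nil]

lemma pvDropWhile_ge (hours : List Int) (c : Int) : ∀ (l : List Nat),
    l.Pairwise (fun a b => pvPS hours a < pvPS hours b) →
    ∀ p ∈ l.dropWhile (fun q => decide (pvPS hours q < c)), ¬ (pvPS hours p < c) := by
  intro l
  induction l with
  | nil => simp
  | cons a l ih =>
    intro hpw p hp
    rw [List.pairwise_cons] at hpw
    by_cases ha : pvPS hours a < c
    · rw [List.dropWhile_cons, if_pos (by simpa using ha)] at hp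
      exact ih hpw.2 p hp
    · rw [List.dropWhile_cons, if_neg (by simpa using ha)] at hp
      rcases List.mem_cons.mp hp with rfl | hp
      · exact ha
      · have := hpw.1 p hp
        omega

lemma pvBuild_inv (hours : List Int) : ∀ (t : List Int) (j : Nat) (s : List Int) (st : List Nat),
    1 ≤ j → j ≤ hours.length + 1 → hours.drop (j-1) = t →
    s.length = hours.length + 1 →
    (∀ k, k < j → s.getD k 0 = pvPS hours k) →
    st ≠ [] →
    (∀ p ∈ st, p < j) →
    st.Pairwise (fun a b => b < a) →
    (∀ p ∈ st, pvPM hours p) →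
    (∀ p, p < j → pvPM hours p → p ∈ st) →
    (∀ k, k < j → pvPS hours (st.headD 0) ≤ pvPS hours k) →
    ((∀ k, k ≤ hours.length → (pvBuild s st j t).1.getD k 0 = pvPS hours k) ∧
     (∀ p ∈ (pvBuild s st j t).2, p ≤ hours.length ∧ pvPM hours p) ∧
     ((pvBuild s st j t).2.Pairwise (fun a b => b < a)) ∧
     (∀ p, p ≤ hours.length → pvPM hours p → p ∈ (pvBuild s st j t).2)) := by
  intro t
  induction t with
  | nil =>
    intro j s st h1 h2 hdrop hlen hsk _hne hlt hpw hpm hcompl _hmin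
    have hj : j = hours.length + 1 := by
      have := congrArg List.length hdrop
      simp [List.length_drop] at this
      omega
    subst hj
    simp only [pvBuild]
    exact ⟨fun k hk => hsk k (by omega),
      fun p hp => ⟨by have := hlt p hp; omega, hpm p hp⟩, hpw,
      fun p hp hpmp => hcompl p (by omega) hpmp⟩
  | cons h t ih =>
    intro j s st h1 h2 hdrop hlen hsk hne hlt hpw hpm hcompl hmin
    -- facts about the position
    have hhead : hours[j-1]? = some h := by
      rw [← List.head?_drop, hdrop]; rfl
    have hjn : j - 1 < hours.length := List.getElem?_eq_some_iff.mp hhead |>.choose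
    have hgd : hours.getD (j-1) 0 = h := by
      rw [List.getD_eq_getElem?_getD, hhead]; rfl
    have hdrop' : hours.drop j = t := by
      have := congrArg List.tail hdrop
      rw [List.tail_drop] at this
      have hj1 : j - 1 + 1 = j := by omega
      rw [hj1] at this
      simpa using this
    have hjlen : j < s.length := by omega
    -- the written value is the next prefix score
    have hval : s.getD (j-1) 0 + (if h > 8 then (1:Int) else -1) = pvPS hours j := by
      have := pvPS_succ hours (j-1) hjn
      rw [hgd] at this
      rw [hsk (j-1) (by omega)]
      have hj1 : j - 1 + 1 = j := by omega
      rw [hj1] at this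
      rw [this]; rfl
    set v := s.getD (j-1) 0 + (if h > 8 then (1:Int) else -1) with hv
    have hset_self : (s.set j v).getD j 0 = pvPS hours j := by
      simp [List.getD_eq_getElem?_getD, hjlen]
      exact hval
    have hset_ne : ∀ k, k ≠ j → (s.set j v).getD k 0 = s.getD k 0 := by
      intro k hk
      simp [List.getD_eq_getElem?_getD, List.getElem?_set_ne (Ne.symm hk)]
    have hsk' : ∀ k, k < j + 1 → (s.set j v).getD k 0 = pvPS hours k := by
      intro k hk
      by_cases hkj : k = j
      · subst hkj; exact hset_self
      · rw [hset_ne k hkj]; exact hsk k (by omega)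
    have hheadmem : st.headD 0 ∈ st := by
      cases st with
      | nil => exact absurd rfl hne
      | cons a l => exact List.mem_cons_self
    have hheadlt : st.headD 0 < j := hlt _ hheadmem
    have hhead_ps : (s.set j v).getD (st.headD 0) 0 = pvPS hours (st.headD 0) := by
      rw [hset_ne _ (by omega)]
      exact hsk _ hheadlt
    have hlen' : (s.set j v).length = hours.length + 1 := by simpa using hlen
    -- the branch condition is ps j < ps head
    simp only [pvBuild]
    rw [← hv]
    simp only [hset_self, hhead_ps]
    by_cases hc : pvPS hours j < pvPS hours (st.headD 0)
    · rw [if_pos hc]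
      -- j is a new strict prefix minimum
      have hPMj : pvPM hours j := by
        intro k hk
        exact lt_of_lt_of_le hc (hmin k hk)
      apply ih (j+1) (s.set j v) (j :: st) (by omega) (by omega) (by simpa using hdrop')
        hlen' hsk' (by simp)
      · intro p hp
        rcases List.mem_cons.mp hp with rfl | hp
        · omega
        · have := hlt p hp; omega
      · exact List.pairwise_cons.mpr ⟨fun p hp => hlt p hp, hpw⟩
      · intro p hp
        rcases List.mem_cons.mp hp with rfl | hp
        · exact hPMj
        · exact hpm p hp
      · intro p hp hpmp
        by_cases hpj : p = j
        · subst hpj; exact List.mem_cons_self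
        · exact List.mem_cons_of_mem _ (hcompl p (by omega) hpmp)
      · intro k hk
        simp only [List.headD_cons]
        by_cases hkj : k = j
        · subst hkj; exact le_refl _
        · exact le_of_lt (lt_of_lt_of_le hc (hmin k (by omega)))
    · rw [if_neg hc]
      apply ih (j+1) (s.set j v) st (by omega) (by omega) (by simpa using hdrop')
        hlen' hsk' hne
      · intro p hp; have := hlt p hp; omega
      · exact hpw
      · exact hpm
      · intro p hp hpmp
        by_cases hpj : p = j
        · subst hpj
          have := hpmp (st.headD 0) hheadlt
          omega
        · exact hcompl p (by omega) hpmp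
      · intro k hk
        by_cases hkj : k = j
        · subst hkj; exact le_of_not_gt hc
        · exact hmin k (by omega)

lemma pvWhile_congr (l : List Nat) (p q : Nat → Bool) (h : ∀ x ∈ l, p x = q x) :
    l.takeWhile p = l.takeWhile q ∧ l.dropWhile p = l.dropWhile q := by
  induction l with
  | nil => simp
  | cons a l ih =>
    have ha : p a = q a := h a List.mem_cons_self
    have ih' := ih (fun x hx => h x (List.mem_cons_of_mem _ hx))
    rw [List.takeWhile_cons, List.dropWhile_cons, List.takeWhile_cons, List.dropWhile_cons, ha,
      ih'.1, ih'.2]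
    exact ⟨rfl, rfl⟩

lemma pvOuter_inv (hours : List Int) (s : List Int)
    (hs : ∀ k, k ≤ hours.length → s.getD k 0 = pvPS hours k) :
    ∀ (i : Nat) (st : List Nat) (ans : Int),
    i ≤ hours.length →
    (∀ p ∈ st, p ≤ hours.length ∧ pvPM hours p) →
    st.Pairwise (fun a b => pvPS hours a < pvPS hours b) →
    (∀ p, p ≤ hours.length → pvPM hours p →
      (∀ j, i < j → j ≤ hours.length → pvPS hours j ≤ pvPS hours p) → p ∈ st) →
    0 ≤ ans →
    (∀ p j : Nat, p ≤ hours.length → pvPM hours p → i < j → j ≤ hours.length →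
      pvPS hours p < pvPS hours j → (j:Int) - (p:Int) ≤ ans) →
    (ans = 0 ∨ ∃ p j : Nat, p < j ∧ j ≤ hours.length ∧ pvPS hours p < pvPS hours j ∧
      ans = (j:Int) - (p:Int)) →
    (ans ≤ pvOuter s i st ans ∧
     (∀ p j : Nat, p ≤ hours.length → pvPM hours p → 0 < j → j ≤ i →
       pvPS hours p < pvPS hours j → (j:Int) - (p:Int) ≤ pvOuter s i st ans) ∧
     0 ≤ pvOuter s i st ans ∧
     (pvOuter s i st ans = 0 ∨ ∃ p j : Nat, p < j ∧ j ≤ hours.length ∧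
       pvPS hours p < pvPS hours j ∧ pvOuter s i st ans = (j:Int) - (p:Int))) := by
  intro i
  induction i with
  | zero =>
    intro st ans _ _ _ _ h0 _ h3
    simp only [pvOuter]
    exact ⟨le_refl _, fun p j _ _ hj hj' _ => by omega, h0, h3⟩
  | succ i ih =>
    intro st ans hin hmem hpw hiff h0 h2 h3
    -- unfold one outer iteration and rewrite the pop loop
    simp only [pvOuter, pvPop_spec]
    -- switch the loop predicate from array reads to prefix scores
    have hcongr : ∀ x ∈ st, (fun p => decide (s.getD (i+1) 0 > s.getD p 0)) x
        = (fun p => decide (pvPS hours x < pvPS hours (i+1))) x := by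
      intro x hx
      simp only [hs (i+1) (by omega), hs x (hmem x hx).1, gt_iff_lt]
    have hw := pvWhile_congr st _ _ hcongr
    rw [hw.1, hw.2]
    set tk := st.takeWhile (fun p => decide (pvPS hours p < pvPS hours (i+1))) with htk
    set dr := st.dropWhile (fun p => decide (pvPS hours p < pvPS hours (i+1))) with hdr
    set ans' := tk.foldl (fun (x : Int) (p : Nat) => max x (((i+1 : Nat) : Int) - (p : Int))) ans
      with hans'
    obtain ⟨hF1, hF2, hF3⟩ := pvFoldMax (fun p : Nat => ((i+1 : Nat) : Int) - (p : Int)) tk ans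
    rw [← hans'] at hF1 hF2 hF3
    have hsplit : tk ++ dr = st := by rw [htk, hdr]; exact List.takeWhile_append_dropWhile
    have htk_mem : ∀ p ∈ tk, p ∈ st := fun p hp => by
      rw [← hsplit]; exact List.mem_append_left _ hp
    have hdr_mem : ∀ p ∈ dr, p ∈ st := fun p hp => by
      rw [← hsplit]; exact List.mem_append_right _ hp
    have htk_lt : ∀ p ∈ tk, pvPS hours p < pvPS hours (i+1) := by
      intro p hp
      have := List.mem_takeWhile_imp (htk ▸ hp)
      exact of_decide_eq_true this
    have hdr_ge : ∀ p ∈ dr, ¬ (pvPS hours p < pvPS hours (i+1)) :=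
      pvDropWhile_ge hours (pvPS hours (i+1)) st hpw
    -- the new ans dominates every pair with right end i+1
    have hnew : ∀ p : Nat, p ≤ hours.length → pvPM hours p →
        pvPS hours p < pvPS hours (i+1) → ((i+1 : Nat) : Int) - (p : Int) ≤ ans' := by
      intro p hp hpm hlt
      by_cases hpst : p ∈ st
      · have hptk : p ∈ tk := by
          rw [← hsplit] at hpst
          rcases List.mem_append.mp hpst with h | h
          · exact h
          · exact absurd hlt (hdr_ge p h)
        exact hF2 p hptk
      · have hex : ¬ (∀ j, i+1 < j → j ≤ hours.length → pvPS hours j ≤ pvPS hours p) := by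
          intro hall
          exact hpst (hiff p hp hpm hall)
        push Not at hex
        obtain ⟨j', hj'1, hj'2, hj'3⟩ := hex
        have hle1 : (j' : Int) - (p : Int) ≤ ans := h2 p j' hp hpm hj'1 hj'2 hj'3
        have hle2 : ((i+1 : Nat) : Int) - (p : Int) ≤ (j' : Int) - (p : Int) := by
          have : ((i:Int) + 1 < (j' : Int)) := by exact_mod_cast hj'1
          push_cast
          omega
        exact le_trans hle2 (le_trans hle1 hF1)
    -- hypotheses for the recursive call at level i
    have hmem' : ∀ p ∈ dr, p ≤ hours.length ∧ pvPM hours p := fun p hp => hmem p (hdr_mem p hp)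
    have hpw' : dr.Pairwise (fun a b => pvPS hours a < pvPS hours b) :=
      hpw.sublist (hdr ▸ List.dropWhile_sublist _)
    have hiff' : ∀ p, p ≤ hours.length → pvPM hours p →
        (∀ j, i < j → j ≤ hours.length → pvPS hours j ≤ pvPS hours p) → p ∈ dr := by
      intro p hp hpm hall
      have hpst : p ∈ st := hiff p hp hpm (fun j hj1 hj2 => hall j (by omega) hj2)
      have hge : pvPS hours (i+1) ≤ pvPS hours p := hall (i+1) (by omega) (by omega)
      rw [← hsplit] at hpst
      rcases List.mem_append.mp hpst with h | h
      · exact absurd (htk_lt p h) (by omega)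
      · exact h
    have h0' : 0 ≤ ans' := le_trans h0 hF1
    have h2' : ∀ p j : Nat, p ≤ hours.length → pvPM hours p → i < j → j ≤ hours.length →
        pvPS hours p < pvPS hours j → (j:Int) - (p:Int) ≤ ans' := by
      intro p j hp hpm hj1 hj2 hj3
      by_cases hji : j = i+1
      · subst hji; exact hnew p hp hpm hj3
      · exact le_trans (h2 p j hp hpm (by omega) hj2 hj3) hF1
    have h3' : ans' = 0 ∨ ∃ p j : Nat, p < j ∧ j ≤ hours.length ∧
        pvPS hours p < pvPS hours j ∧ ans' = (j:Int) - (p:Int) := by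
      rcases hF3 with h | ⟨p, hptk, h⟩
      · rw [h]; exact h3
      · right
        have hpst := htk_mem p hptk
        have hplt := htk_lt p hptk
        have hple : p ≤ hours.length := (hmem p hpst).1
        have hpi : p < i + 1 := by
          have hnonneg : (0:Int) ≤ ans' := h0'
          rw [h] at hnonneg
          have hple' : p ≤ i + 1 := by
            by_contra hgt
            push Not at hgt
            have : ((i+1 : Nat) : Int) < (p : Int) := by exact_mod_cast hgt
            omega
          rcases Nat.lt_or_ge p (i+1) with hlt' | hge'
          · exact hlt'
          · have heq : p = i + 1 := by omega
            rw [heq] at hplt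
            omega
        exact ⟨p, i+1, hpi, by omega, hplt, h⟩
    obtain ⟨C1, C2, C3, C4⟩ := ih dr ans' (by omega) hmem' hpw' hiff' h0' h2' h3'
    refine ⟨le_trans hF1 C1, ?_, C3, C4⟩
    intro p j hp hpm hj0 hj1 hj3
    by_cases hji : j = i+1
    · subst hji
      exact le_trans (hnew p hp hpm hj3) C1
    · exact C2 p j hp hpm hj0 (by omega) hj3

lemma pvA_sat (hours : List Int) : pvG hours (longestWPI1 hours) := by
  have hb := pvBuild_inv hours hours 1 (List.replicate (hours.length+1) 0) [0]
    (le_refl 1) (by omega) (by simp) (by simp)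
    (by
      intro k hk
      have hk0 : k = 0 := by omega
      subst hk0
      simp [List.getD_eq_getElem?_getD]
      rfl)
    (by simp) (by simp) (by simp)
    (by
      intro p hp
      simp at hp
      subst hp
      intro k hk
      omega)
    (by
      intro p hp _
      have : p = 0 := by omega
      simp [this])
    (by
      intro k hk
      have : k = 0 := by omega
      simp [this])
  obtain ⟨hs', hmem, hpw', hcompl⟩ := hb
  have hpwps : (pvBuild (List.replicate (hours.length+1) 0) [0] 1 hours).2.Pairwise
      (fun a b => pvPS hours a < pvPS hours b) := by
    refine hpw'.imp_of_mem ?_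
    intro a b ha hb hab
    exact (hmem a ha).2 b hab
  obtain ⟨C1, C2, C3, C4⟩ := pvOuter_inv hours _ hs' hours.length _ 0 (le_refl _)
    hmem hpwps (fun p hp hpm _ => hcompl p hp hpm) (le_refl 0)
    (fun p j _ _ hj1 hj2 _ => by omega) (Or.inl rfl)
  show pvG hours (pvOuter (pvBuild (List.replicate (hours.length+1) 0) [0] 1 hours).1
    hours.length (pvBuild (List.replicate (hours.length+1) 0) [0] 1 hours).2 0)
  refine ⟨C3, ?_, C4⟩
  intro p j hpj hj hps
  obtain ⟨p', hp'le, hp'pm, hp'ps⟩ := pvExistsPM hours p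
  have hle := C2 p' j (by omega) hp'pm (by omega) hj (by omega)
  have : (p' : Int) ≤ (p : Int) := by exact_mod_cast hp'le
  omega

def pvSeenInv (hours : List Int) (i : Nat) (seen : PySem.Dict Int Int) : Prop :=
  ∀ v idx, seen.get? v = some idx ↔
    ∃ p : Nat, 1 ≤ p ∧ p ≤ i ∧ pvPS hours p = v ∧ idx = (p:Int) - 1 ∧
      ∀ q, 1 ≤ q → q < p → pvPS hours q ≠ v

lemma pvFirstOcc (hours : List Int) (v : Int) (i : Nat)
    (h : ∃ q, 1 ≤ q ∧ q ≤ i ∧ pvPS hours q = v) :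
    ∃ p : Nat, 1 ≤ p ∧ p ≤ i ∧ pvPS hours p = v ∧
      ∀ q, 1 ≤ q → q < p → pvPS hours q ≠ v := by
  obtain ⟨q, hq1, hq2, hq3⟩ := h
  have hex : ∃ n, 1 ≤ n ∧ pvPS hours n = v := ⟨q, hq1, hq3⟩
  refine ⟨Nat.find hex, (Nat.find_spec hex).1, ?_, (Nat.find_spec hex).2, ?_⟩
  · exact le_trans (Nat.find_min' hex ⟨hq1, hq3⟩) hq2
  · intro q' hq'1 hq'2 hq'3
    exact Nat.find_min hex hq'2 ⟨hq'1, hq'3⟩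

lemma pvStep_eval (ans score : Int) (seen : PySem.Dict Int Int) (i h : Int) :
    pvStep (ans, score, seen) (i, h) =
      (if score + (if h > 8 then (1:Int) else -1) > 0 then i + 1
       else if seen.contains (score + (if h > 8 then (1:Int) else -1) - 1) then
         max ans (i - seen.getD (score + (if h > 8 then (1:Int) else -1) - 1) 0)
       else ans,
       score + (if h > 8 then (1:Int) else -1),
       if seen.contains (score + (if h > 8 then (1:Int) else -1)) then seen
       else seen.insert (score + (if h > 8 then (1:Int) else -1)) i) := rfl

lemma pvB_loop (hours : List Int) : ∀ (t : List Int) (i : Nat) (ans score : Int)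
    (seen : PySem.Dict Int Int),
    hours.drop i = t → i ≤ hours.length →
    score = pvPS hours i →
    pvSeenInv hours i seen →
    0 ≤ ans →
    (∀ p j : Nat, p < j → j ≤ i → pvPS hours p < pvPS hours j → (j:Int) - (p:Int) ≤ ans) →
    (ans = 0 ∨ ∃ p j : Nat, p < j ∧ j ≤ hours.length ∧ pvPS hours p < pvPS hours j ∧
      ans = (j:Int) - (p:Int)) →
    pvG hours ((PySem.List.enumerate t (i:Int)).foldl pvStep (ans, score, seen)).1 := by
  intro t
  induction t with
  | nil =>
    intro i ans score seen hdrop hin _hscore _hseen h0 h2 h3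
    have hi : i = hours.length := by
      have := congrArg List.length hdrop
      simp [List.length_drop] at this
      omega
    subst hi
    rw [PySem.List.enumerate_nil, List.foldl_nil]
    exact ⟨h0, fun p j hpj hj hps => h2 p j hpj hj hps, h3⟩
  | cons h t ih =>
    intro i ans score seen hdrop hin hscore hseen h0 h2 h3
    have hhead : hours[i]? = some h := by
      rw [← List.head?_drop, hdrop]; rfl
    have hilt : i < hours.length := List.getElem?_eq_some_iff.mp hhead |>.choose
    have hgd : hours.getD i 0 = h := by
      rw [List.getD_eq_getElem?_getD, hhead]; rfl
    have hdrop' : hours.drop (i+1) = t := by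
      have := congrArg List.tail hdrop
      rw [List.tail_drop] at this
      simpa using this
    have hsc : score + (if h > 8 then (1:Int) else -1) = pvPS hours (i+1) := by
      rw [hscore, pvPS_succ hours i hilt, hgd]; rfl
    rw [PySem.List.enumerate_cons, List.foldl_cons, pvStep_eval, hsc]
    have hcast : (i : Int) + 1 = ((i+1 : Nat) : Int) := by push_cast; ring
    -- the new seen satisfies the invariant at i+1
    have hseen' : pvSeenInv hours (i+1)
        (if seen.contains (pvPS hours (i+1)) then seen
         else seen.insert (pvPS hours (i+1)) (i : Int)) := by
      by_cases hsc2 : seen.contains (pvPS hours (i+1))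
      · rw [if_pos hsc2]
        intro v idx
        constructor
        · intro hg
          obtain ⟨p, hp1, hp2, hp3, hp4, hp5⟩ := (hseen v idx).mp hg
          exact ⟨p, hp1, by omega, hp3, hp4, hp5⟩
        · rintro ⟨p, hp1, hp2, hp3, hp4, hp5⟩
          by_cases hpi : p ≤ i
          · exact (hseen v idx).mpr ⟨p, hp1, hpi, hp3, hp4, hp5⟩
          · have hpe : p = i + 1 := by omega
            subst hpe
            -- seen already contains ps (i+1), contradicting firstness of i+1
            have hg2 : (seen.get? (pvPS hours (i+1))).isSome := by
              rw [← PySem.Dict.contains_eq_isSome_get?]; exact hsc2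
            obtain ⟨idx0, hidx0⟩ := Option.isSome_iff_exists.mp hg2
            obtain ⟨p0, hq1, hq2, hq3, _, _⟩ := (hseen _ idx0).mp hidx0
            exact absurd hq3 (by rw [← hp3] at *; exact hp5 p0 hq1 (by omega))
      · rw [if_neg hsc2]
        intro v idx
        rw [PySem.Dict.get?_insert]
        by_cases hv : v = pvPS hours (i+1)
        · rw [if_pos hv]
          constructor
          · intro hg
            have hidx : idx = (i : Int) := by injection hg with hg'; omega
            refine ⟨i+1, by omega, le_refl _, by rw [hv], by rw [hidx]; push_cast; ring, ?_⟩
            intro q hq1 hq2 hq3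
            have hfo := pvFirstOcc hours v i ⟨q, hq1, by omega, hq3⟩
            obtain ⟨p0, hp01, hp02, hp03, hp04⟩ := hfo
            have hg0 : seen.get? v = some ((p0 : Int) - 1) :=
              (hseen v _).mpr ⟨p0, hp01, hp02, hp03, rfl, hp04⟩
            have : (seen.get? v).isSome := by rw [hg0]; rfl
            rw [← PySem.Dict.contains_eq_isSome_get?, hv] at this
            exact hsc2 this
          · rintro ⟨p, hp1, hp2, hp3, hp4, hp5⟩
            by_cases hpi : p ≤ i
            · have hg0 := (hseen v idx).mpr ⟨p, hp1, hpi, hp3, hp4, hp5⟩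
              have : (seen.get? v).isSome := by rw [hg0]; rfl
              rw [← PySem.Dict.contains_eq_isSome_get?, hv] at this
              exact absurd this hsc2
            · have hpe : p = i + 1 := by omega
              subst hpe
              rw [hp4, ← hcast]
              congr 1
              omega
        · rw [if_neg hv]
          constructor
          · intro hg
            obtain ⟨p, hp1, hp2, hp3, hp4, hp5⟩ := (hseen v idx).mp hg
            exact ⟨p, hp1, by omega, hp3, hp4, hp5⟩
          · rintro ⟨p, hp1, hp2, hp3, hp4, hp5⟩
            by_cases hpi : p ≤ i
            · exact (hseen v idx).mpr ⟨p, hp1, hpi, hp3, hp4, hp5⟩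
            · have hpe : p = i + 1 := by omega
              subst hpe
              exact absurd hp3 (fun hh => hv hh.symm)
    by_cases hpos : pvPS hours (i+1) > 0
    · rw [if_pos hpos]
      have := ih (i+1) ((i:Int) + 1) (pvPS hours (i+1)) _ hdrop' (by omega) rfl hseen'
        (by omega)
        (by
          intro p j hpj hj hps
          have : (j : Int) ≤ (i : Int) + 1 := by exact_mod_cast hj
          have : (0:Int) ≤ (p : Int) := by positivity
          omega)
        (Or.inr ⟨0, i+1, by omega, by omega, by rw [show pvPS hours 0 = 0 from rfl]; omega,
          by rw [← hcast]; omega⟩)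
      rw [hcast] at this ⊢
      exact this
    · rw [if_neg hpos]
      have hps1le : pvPS hours (i+1) ≤ 0 := by omega
      -- any left end p' < i+1 with ps p' < ps (i+1) is dominated by the first
      -- occurrence of the value ps (i+1) - 1, which is what seen records
      have hkey : ∀ p' : Nat, p' < i+1 → pvPS hours p' < pvPS hours (i+1) →
          ∃ p : Nat, 1 ≤ p ∧ p ≤ i ∧ pvPS hours p = pvPS hours (i+1) - 1 ∧
            (∀ q, 1 ≤ q → q < p → pvPS hours q ≠ pvPS hours (i+1) - 1) ∧ p ≤ p' := by
        intro p' hp'1 hp'2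
        have hp'0 : 1 ≤ p' := by
          rcases Nat.eq_zero_or_pos p' with rfl | h'
          · rw [show pvPS hours 0 = 0 from rfl] at hp'2; omega
          · omega
        obtain ⟨c, hc1, hc2, hc3⟩ := pvIVT hours p' 0 (pvPS hours (i+1) - 1)
          (by simpa using by omega : 0 + p' ≤ hours.length)
          (by rw [show pvPS hours 0 = 0 from rfl]; omega)
          (by simpa using by omega)
        have hc0 : 1 ≤ c := by
          rcases Nat.eq_zero_or_pos c with rfl | h'
          · rw [show pvPS hours 0 = 0 from rfl] at hc3; omega
          · omega
        obtain ⟨p, hp1, hp2, hp3, hp4⟩ := pvFirstOcc hours (pvPS hours (i+1) - 1) c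
          ⟨c, hc0, le_refl _, hc3⟩
        refine ⟨p, hp1, by omega, hp3, hp4, by omega⟩
      by_cases hct : seen.contains (pvPS hours (i+1) - 1)
      · rw [if_pos hct]
        have hg2 : (seen.get? (pvPS hours (i+1) - 1)).isSome := by
          rw [← PySem.Dict.contains_eq_isSome_get?]; exact hct
        obtain ⟨idx, hidx⟩ := Option.isSome_iff_exists.mp hg2
        obtain ⟨p, hp1, hp2, hp3, hp4, hp5⟩ := (hseen _ idx).mp hidx
        have hgdidx : seen.getD (pvPS hours (i+1) - 1) 0 = idx := by
          rw [PySem.Dict.getD_eq_get?_getD, hidx]; rfl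
        rw [hgdidx]
        set ans' := max ans ((i:Int) - idx) with hans'
        have hans'e : (i:Int) - idx = ((i+1 : Nat) : Int) - (p : Int) := by
          rw [hp4, ← hcast]; omega
        apply ih (i+1) ans' (pvPS hours (i+1)) _ hdrop' (by omega) rfl hseen'
          (le_trans h0 (le_max_left _ _))
        · intro p' j hpj hj hps
          by_cases hje : j = i+1
          · subst hje
            obtain ⟨p0, hp01, hp02, hp03, hp04, hp05⟩ := hkey p' hpj hps
            -- p is the recorded first occurrence; p = p0 by uniqueness of firstness
            have hpe : p = p0 := by
              rcases Nat.lt_trichotomy p p0 with h' | h' | h'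
              · exact absurd hp3 (hp04 p hp1 h')
              · exact h'
              · exact absurd hp03 (hp5 p0 hp01 h')
            have hple : (p : Int) ≤ (p' : Int) := by
              rw [hpe]; exact_mod_cast hp05
            rw [hans']
            have := le_max_right ans ((i:Int) - idx)
            rw [hans'e] at this
            omega
          · have hj' : j ≤ i := by omega
            exact le_trans (h2 p' j hpj hj' hps) (le_max_left _ _)
        · rcases max_choice ans ((i:Int) - idx) with hm | hm
          · rw [hans', hm]; exact h3
          · right
            exact ⟨p, i+1, by omega, by omega, by omega, by rw [hans', hm, hans'e]⟩
      · rw [if_neg hct]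
        apply ih (i+1) ans (pvPS hours (i+1)) _ hdrop' (by omega) rfl hseen' h0
        · intro p' j hpj hj hps
          by_cases hje : j = i+1
          · subst hje
            obtain ⟨p0, hp01, hp02, hp03, hp04, hp05⟩ := hkey p' hpj hps
            have hg0 : seen.get? (pvPS hours (i+1) - 1) = some ((p0 : Int) - 1) :=
              (hseen _ _).mpr ⟨p0, hp01, hp02, hp03, rfl, hp04⟩
            have : (seen.get? (pvPS hours (i+1) - 1)).isSome := by rw [hg0]; rfl
            rw [← PySem.Dict.contains_eq_isSome_get?] at this
            exact absurd this hct
          · exact h2 p' j hpj (by omega) hps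
        · exact h3

lemma pvB_sat (hours : List Int) : pvG hours (longestWPI1_alt hours) := by
  have := pvB_loop hours hours 0 0 0 PySem.Dict.empty List.drop_zero (by omega) rfl
    (by
      intro v idx
      rw [PySem.Dict.get?_empty]
      constructor
      · intro hg; cases hg
      · rintro ⟨p, hp1, hp2, _⟩; omega)
    (le_refl 0)
    (fun p j hpj hj _ => by omega)
    (Or.inl rfl)
  simpa [longestWPI1_alt] using this

-- ===== VERDICT (by name: the statement is the Claim_ definition above) =====
theorem longestWPI1_spec : Claim_equal_longestWPI1 := by
  intro hours _
  unfold Spec_longestWPI1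
  exact pvG_unique hours _ _ (pvA_sat hours) (pvB_sat hours)
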